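-- pv_equiv track=rewrite | github.com/wshal/Open-Assistant | ui/settings_view.py | _recommended_ollama_model
-- ===== SOURCE A (Python) =====
-- def _recommended_ollama_model(models, mode: str = "general") -> str:
--     if not models:
--         return ""
--
--     model_names = [m for m in models if m]
--     mode = (mode or "general").lower()
--
--     def pick(markers):
--         for marker in markers:
--             for model in model_names:
--                 if marker in model.lower():
--                     return model
--         return ""
--
--     if mode == "coding":
--         chosen = pick(
--             [
--                 "coder",
--                 "codestral",
--                 "deepseek-coder",
--                 "codegemma",
--                 "qwen2.5-coder",
--                 "qwen2.5",
--                 "qwen2",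
--                 "llama3.1",
--                 "llama3.2",
--             ]
--         )
--         if chosen:
--             return chosen
--
--     chosen = pick(
--         [
--             "llama3.2",
--             "llama3.1",
--             "qwen2.5",
--             "qwen2",
--             "mistral",
--             "gemma",
--             "phi3",
--         ]
--     )
--     return chosen or model_names[0]
-- ===== SOURCE B (Python) =====
-- CODING_MARKERS = ["coder", "codestral", "deepseek-coder", "codegemma", "qwen2.5-coder", "qwen2.5", "qwen2", "llama3.1", "llama3.2"]
-- GENERAL_MARKERS = ["llama3.2", "llama3.1", "qwen2.5", "qwen2", "mistral", "gemma", "phi3"]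
--
--
-- def _pick(model_names, markers):
--     # one pass over the models: each model's rank is the smallest index of a
--     # marker contained in its lowercased name; keep the (rank, position)-minimum
--     best = None  # ((rank, position), name)
--     for pos, name in enumerate(model_names):
--         low = name.lower()
--         hits = [i for i, mk in enumerate(markers) if mk in low]
--         if hits:
--             key = (min(hits), pos)
--             if best is None or key < best[0]:
--                 best = (key, name)
--     return best[1] if best is not None else ""
--
--
-- def _recommended_ollama_model(models, mode: str = "general") -> str:
--     if not models:
--         return ""
--     model_names = [m for m in models if m]
--     if not model_names:
--         return ""
--     mode = (mode or "general").lower()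
--     if mode == "coding":
--         chosen = _pick(model_names, CODING_MARKERS)
--         if chosen:
--             return chosen
--     return _pick(model_names, GENERAL_MARKERS) or model_names[0]
-- ===== Notes on version B (the rewrite author's own statement) =====
-- stated objective: alternative
-- what changed: pick() no longer runs A's marker-major nested scan (each marker re-scanning all models); B makes a single pass over the models, computing each model's minimal matching marker index via enumerate and keeping the (marker_index, position)-lexicographic minimum.
import Mathlib
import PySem

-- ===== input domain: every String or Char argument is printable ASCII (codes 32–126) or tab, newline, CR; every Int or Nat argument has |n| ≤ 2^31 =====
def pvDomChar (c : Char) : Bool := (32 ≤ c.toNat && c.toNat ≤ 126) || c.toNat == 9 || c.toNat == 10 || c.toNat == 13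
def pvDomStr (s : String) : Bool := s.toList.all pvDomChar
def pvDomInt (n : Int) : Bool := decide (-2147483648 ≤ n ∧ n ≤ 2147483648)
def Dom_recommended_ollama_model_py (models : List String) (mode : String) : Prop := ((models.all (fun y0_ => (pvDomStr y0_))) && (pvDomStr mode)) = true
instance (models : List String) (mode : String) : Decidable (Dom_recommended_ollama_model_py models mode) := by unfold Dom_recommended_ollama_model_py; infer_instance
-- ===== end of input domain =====

-- B replaces A's marker-major double scan by a single pass over the models that keeps the
-- (marker-index, position)-minimal match (objective: alternative decomposition, same result).

-- ===== PORT A =====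
-- the two literal marker lists of the Python source (shared data of both ports)
def codingMarkers : List String :=
  ["coder", "codestral", "deepseek-coder", "codegemma", "qwen2.5-coder",
   "qwen2.5", "qwen2", "llama3.1", "llama3.2"]

def generalMarkers : List String :=
  ["llama3.2", "llama3.1", "qwen2.5", "qwen2", "mistral", "gemma", "phi3"]

-- A's pick: for marker in markers: for model in model_names: if marker in model.lower(): return model
def pickA (names : List String) : List String → String
  | [] => ""
  | mk :: rest =>
    match names.find? (fun m => PySem.Str.isIn mk (PySem.Str.lower m)) with
    | some m => m
    | none => pickA names rest

def recommended_ollama_model_py (models : List String) (mode : String) : String :=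
  if models = [] then ""
  else
    let model_names := models.filter (fun m => !(m == ""))
    let md := PySem.Str.lower (if mode == "" then "general" else mode)
    let chosenC := if md == "coding" then pickA model_names codingMarkers else ""
    if chosenC ≠ "" then chosenC
    else
      let chosen := pickA model_names generalMarkers
      -- model_names[0] raises IndexError when model_names = [] (excluded by Pre_)
      if chosen ≠ "" then chosen else (PySem.List.pyGet? model_names 0).getD ""

-- ===== PORT B =====
-- Python's '<' on (int, int) tuples: lexicographic (ported by hand; exact for int pairs)
def ltKey (a b : Int × Int) : Bool := a.1 < b.1 || (a.1 == b.1 && a.2 < b.2)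

-- B's pick: one pass over the models, keeping the best ((marker_index, position), name)
def pickB (names : List String) (markers : List String) : String :=
  let best := (PySem.List.enumerate names).foldl
    (fun best p =>
      let low := PySem.Str.lower p.2
      let hits := ((PySem.List.enumerate markers).filter
                    (fun q => PySem.Str.isIn q.2 low)).map (fun q => q.1)
      if hits ≠ [] then
        let key : Int × Int := ((PySem.List.min? hits (fun x => x)).getD 0, p.1)
        match best with
        | none => some (key, p.2)
        | some b => if ltKey key b.1 then some (key, p.2) else some b
      else best)
    (none : Option ((Int × Int) × String))
  match best with
  | some b => b.2
  | none => ""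

def recommended_ollama_model_py_alt (models : List String) (mode : String) : String :=
  if models = [] then ""
  else
    let model_names := models.filter (fun m => !(m == ""))
    if model_names = [] then ""
    else
      let md := PySem.Str.lower (if mode == "" then "general" else mode)
      if md == "coding" then
        let chosen := pickB model_names codingMarkers
        if chosen ≠ "" then chosen
        else
          let g := pickB model_names generalMarkers
          if g ≠ "" then g else (PySem.List.pyGet? model_names 0).getD ""
      else
        let g := pickB model_names generalMarkers
        if g ≠ "" then g else (PySem.List.pyGet? model_names 0).getD ""

-- ===== PRECONDITION & SPEC =====
-- Pre_ excludes only the inputs where A RAISES: a non-empty models list whose entries are all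
-- empty strings makes model_names empty and A's final model_names[0] raise IndexError.
def Pre_recommended_ollama_model_py (models : List String) (mode : String) : Prop :=
  models = [] ∨ ∃ m ∈ models, m ≠ ""

instance (models : List String) (mode : String) : Decidable (Pre_recommended_ollama_model_py models mode) := by
  unfold Pre_recommended_ollama_model_py; infer_instance

def pvWitness_recommended_ollama_model_py : List String × String := (["LLaMA3.2", "foo"], "coding")

def Spec_recommended_ollama_model_py (models : List String) (mode : String) (out : String) : Prop := out = recommended_ollama_model_py_alt models mode
instance (models : List String) (mode : String) (out : String) : Decidable (Spec_recommended_ollama_model_py models mode out) := by unfold Spec_recommended_ollama_model_py; infer_instance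

-- ===== CLAIM (what is proved, stated in full; the proofs are below) =====
def Claim_equal_recommended_ollama_model_py : Prop := ∀ (models : List String) (mode : String), Dom_recommended_ollama_model_py models mode → Pre_recommended_ollama_model_py models mode → Spec_recommended_ollama_model_py models mode (recommended_ollama_model_py models mode)

-- ===== LEMMAS AND PROOFS =====

-- the per-model candidate of B's pass: (first matching marker index, position, name)
def pvItem (markers : List String) (p : Int × String) : Option ((Int × Int) × String) :=
  (markers.findIdx? (fun mk => PySem.Str.isIn mk (PySem.Str.lower p.2))).map
    (fun i : Nat => (((i : Int), p.1), p.2))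

-- left-biased lexicographic minimum of two optional candidates
def pvCombine (a b : Option ((Int × Int) × String)) : Option ((Int × Int) × String) :=
  match a, b with
  | none, b => b
  | some x, none => some x
  | some x, some y => if ltKey y.1 x.1 then some y else some x

@[simp] theorem pvCombine_none_left (b : Option ((Int × Int) × String)) : pvCombine none b = b := by
  cases b <;> rfl

@[simp] theorem pvCombine_none_right (x : (Int × Int) × String) : pvCombine (some x) none = some x := rfl

@[simp] theorem pvCombine_some_some (x y : (Int × Int) × String) :
    pvCombine (some x) (some y) = if ltKey y.1 x.1 then some y else some x := rfl

def pvBestOf (markers : List String) : List (Int × String) → Option ((Int × Int) × String)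
  | [] => none
  | p :: l => pvCombine (pvItem markers p) (pvBestOf markers l)

theorem pvFoldlMinLeft (t : List Int) (x : Int) (h : ∀ y ∈ t, x ≤ y) : t.foldl min x = x := by
  induction t with
  | nil => rfl
  | cons y t ih =>
    simp only [List.foldl_cons]
    rw [min_eq_left (h y (by simp))]
    exact ih (fun z hz => h z (by simp [hz]))

theorem pvMinHits (markers : List String) (low : String) (s : Int) :
    PySem.List.min? (((PySem.List.enumerate markers s).filter
        (fun q => PySem.Str.isIn q.2 low)).map (fun q => q.1)) (fun x => x)
      = (markers.findIdx? (fun mk => PySem.Str.isIn mk low)).map (fun i : Nat => s + (i : Int)) := by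
  induction markers generalizing s with
  | nil => simp [PySem.List.enumerate_nil, PySem.List.min?]
  | cons mk rest ih =>
    rw [PySem.List.enumerate_cons, List.findIdx?_cons]
    by_cases h : PySem.Str.isIn mk low = true
    · rw [List.filter_cons_of_pos (by simpa using h)]
      simp only [List.map_cons, PySem.List.min?_id_cons]
      have hge : ∀ y ∈ ((PySem.List.enumerate rest (s + 1)).filter
          (fun q => PySem.Str.isIn q.2 low)).map (fun q => q.1), s ≤ y := by
        intro y hy
        simp only [List.mem_map, List.mem_filter] at hy
        obtain ⟨q, ⟨hq, _⟩, rfl⟩ := hy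
        rw [PySem.List.mem_enumerate_iff] at hq
        obtain ⟨k, _, rfl⟩ := hq
        simp only
        omega
      rw [pvFoldlMinLeft _ _ hge, if_pos h]
      simp
    · rw [List.filter_cons_of_neg (by simpa using h), if_neg h, ih (s + 1)]
      cases hfi : rest.findIdx? (fun mk => PySem.Str.isIn mk low) with
      | none => rfl
      | some i =>
        simp only [Option.map_some, Option.some.injEq]
        push_cast
        ring

theorem pvLtKey_mk (a1 a2 b1 b2 : Int) :
    ltKey (a1, a2) (b1, b2) = true ↔ (a1 < b1 ∨ (a1 = b1 ∧ a2 < b2)) := by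
  simp [ltKey]

theorem pvCombine_assoc (a b c : Option ((Int × Int) × String)) :
    pvCombine (pvCombine a b) c = pvCombine a (pvCombine b c) := by
  rcases a with _ | ⟨⟨⟨a1, a2⟩, an⟩⟩ <;> rcases b with _ | ⟨⟨⟨b1, b2⟩, bn⟩⟩ <;>
    rcases c with _ | ⟨⟨⟨c1, c2⟩, cn⟩⟩ <;>
    simp only [pvCombine_none_left, pvCombine_none_right, pvCombine_some_some, pvLtKey_mk] <;>
    split_ifs <;>
    (try simp only [pvCombine_none_right, pvCombine_some_some, pvLtKey_mk]) <;>
    (try split_ifs) <;>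
    first
    | rfl
    | (exfalso; omega)

theorem pvFoldlCombine (markers : List String) (l : List (Int × String))
    (b : Option ((Int × Int) × String)) :
    l.foldl (fun b p => pvCombine b (pvItem markers p)) b = pvCombine b (pvBestOf markers l) := by
  induction l generalizing b with
  | nil => cases b <;> rfl
  | cons p l ih =>
    simp only [List.foldl_cons, pvBestOf, ih, pvCombine_assoc]

-- B's fold body is exactly pvCombine with pvItem
theorem pvBodyEq (markers : List String) (best : Option ((Int × Int) × String)) (p : Int × String) :
    (let low := PySem.Str.lower p.2
     let hits := ((PySem.List.enumerate markers).filter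
                    (fun q => PySem.Str.isIn q.2 low)).map (fun q => q.1)
     if hits ≠ [] then
       let key : Int × Int := ((PySem.List.min? hits (fun x => x)).getD 0, p.1)
       match best with
       | none => some (key, p.2)
       | some b => if ltKey key b.1 then some (key, p.2) else some b
     else best)
      = pvCombine best (pvItem markers p) := by
  have hm := pvMinHits markers (PySem.Str.lower p.2) 0
  show (if _ ≠ ([] : List Int) then _ else _) = _
  cases hf : markers.findIdx? (fun mk => PySem.Str.isIn mk (PySem.Str.lower p.2)) with
  | none =>
    rw [hf] at hm
    simp only [Option.map_none] at hm
    have hnil : ((PySem.List.enumerate markers 0).filter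
        (fun q => PySem.Str.isIn q.2 (PySem.Str.lower p.2))).map (fun q => q.1) = [] :=
      (PySem.List.min?_eq_none_iff _ _).mp hm
    rw [if_neg (by simpa using hnil)]
    simp only [pvItem, hf, Option.map_none]
    cases best <;> rfl
  | some i =>
    rw [hf] at hm
    simp only [Option.map_some] at hm
    have hne : ((PySem.List.enumerate markers 0).filter
        (fun q => PySem.Str.isIn q.2 (PySem.Str.lower p.2))).map (fun q => q.1) ≠ [] := by
      intro hnil
      rw [hnil] at hm
      simp [PySem.List.min?] at hm
    rw [if_pos (by simpa using hne)]
    rw [hm]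
    simp only [pvItem, hf, Option.map_some, Option.getD_some, zero_add]
    cases best <;> rfl

theorem pvPickB_eq_bestOf (names markers : List String) :
    pickB names markers
      = match pvBestOf markers (PySem.List.enumerate names) with
        | some b => b.2
        | none => "" := by
  unfold pickB
  rw [show (fun (best : Option ((Int × Int) × String)) (p : Int × String) =>
      let low := PySem.Str.lower p.2
      let hits := ((PySem.List.enumerate markers).filter
                    (fun q => PySem.Str.isIn q.2 low)).map (fun q => q.1)
      if hits ≠ [] then
        let key : Int × Int := ((PySem.List.min? hits (fun x => x)).getD 0, p.1)
        match best with
        | none => some (key, p.2)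
        | some b => if ltKey key b.1 then some (key, p.2) else some b
      else best)
      = fun best p => pvCombine best (pvItem markers p) from funext fun b => funext fun p => pvBodyEq markers b p]
  rw [pvFoldlCombine, pvCombine_none_left]

theorem pvBestOf_nil_markers (l : List (Int × String)) : pvBestOf [] l = none := by
  induction l with
  | nil => rfl
  | cons p l ih =>
    show pvCombine (pvItem [] p) (pvBestOf [] l) = none
    rw [ih]
    rfl

theorem pvItem_eq_some (markers : List String) (s : Int) (n : String) (z : (Int × Int) × String)
    (hi : pvItem markers (s, n) = some z) :
    ∃ i, markers.findIdx? (fun mk => PySem.Str.isIn mk (PySem.Str.lower n)) = some i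
      ∧ z = (((i : Int), s), n) := by
  simp only [pvItem] at hi
  cases hf : markers.findIdx? (fun mk => PySem.Str.isIn mk (PySem.Str.lower n)) with
  | none => rw [hf] at hi; simp at hi
  | some i =>
    rw [hf] at hi
    simp only [Option.map_some, Option.some.injEq] at hi
    exact ⟨i, rfl, hi.symm⟩

theorem pvBestOf_bounds (markers : List String) (names : List String) (s : Int)
    (x : (Int × Int) × String) (h : pvBestOf markers (PySem.List.enumerate names s) = some x) :
    0 ≤ x.1.1 ∧ s ≤ x.1.2 := by
  induction names generalizing s x with
  | nil => simp [PySem.List.enumerate_nil, pvBestOf] at h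
  | cons n names ih =>
    rw [PySem.List.enumerate_cons] at h
    simp only [pvBestOf] at h
    cases hi : pvItem markers (s, n) with
    | none =>
      rw [hi, pvCombine_none_left] at h
      have := ih (s + 1) x h
      omega
    | some z =>
      obtain ⟨i, hfi, rfl⟩ := pvItem_eq_some markers s n z hi
      rw [hi] at h
      cases ht : pvBestOf markers (PySem.List.enumerate names (s + 1)) with
      | none =>
        rw [ht, pvCombine_none_right] at h
        cases h
        constructor <;> simp
      | some y =>
        rw [ht, pvCombine_some_some] at h
        have hy := ih (s + 1) y ht
        split_ifs at h <;> cases h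
        · omega
        · constructor <;> simp

theorem pvBestOf_shift (mk : String) (rest : List String) (names : List String) (s : Int)
    (h : ∀ n ∈ names, PySem.Str.isIn mk (PySem.Str.lower n) = false) :
    pvBestOf (mk :: rest) (PySem.List.enumerate names s)
      = (pvBestOf rest (PySem.List.enumerate names s)).map
          (fun x => ((x.1.1 + 1, x.1.2), x.2)) := by
  induction names generalizing s with
  | nil => simp [PySem.List.enumerate_nil, pvBestOf]
  | cons n names ih =>
    rw [PySem.List.enumerate_cons]
    simp only [pvBestOf]
    have hn : ¬ PySem.Str.isIn mk (PySem.Str.lower n) = true := by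
      rw [h n (by simp)]
      exact Bool.false_ne_true
    have hitem : pvItem (mk :: rest) (s, n)
        = (pvItem rest (s, n)).map (fun x => ((x.1.1 + 1, x.1.2), x.2)) := by
      simp only [pvItem, List.findIdx?_cons, if_neg hn]
      cases hfi : rest.findIdx? (fun mk => PySem.Str.isIn mk (PySem.Str.lower n)) with
      | none => rfl
      | some i =>
        simp only [Option.map_some, Option.some.injEq, Prod.mk.injEq, and_true]
        push_cast
        ring
    rw [hitem, ih (s + 1) (fun m hm => h m (by simp [hm]))]
    cases pvItem rest (s, n) with
    | none => simp
    | some x =>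
      cases pvBestOf rest (PySem.List.enumerate names (s + 1)) with
      | none => simp
      | some y =>
        rcases x with ⟨⟨x1, x2⟩, xn⟩
        rcases y with ⟨⟨y1, y2⟩, yn⟩
        simp only [Option.map_some, pvCombine_some_some, pvLtKey_mk]
        split_ifs <;> simp only [Option.map_some] <;> first | rfl | (exfalso; omega)

theorem pvBestOf_match (mk : String) (rest : List String) (names : List String) (s : Int)
    (n : String) (h : names.find? (fun m => PySem.Str.isIn mk (PySem.Str.lower m)) = some n) :
    ∃ k, s ≤ k ∧ pvBestOf (mk :: rest) (PySem.List.enumerate names s) = some ((0, k), n) := by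
  induction names generalizing s with
  | nil => simp at h
  | cons n0 names ih =>
    rw [PySem.List.enumerate_cons]
    simp only [pvBestOf]
    by_cases h0 : PySem.Str.isIn mk (PySem.Str.lower n0) = true
    · rw [List.find?_cons_of_pos (p := fun m => PySem.Str.isIn mk (PySem.Str.lower m)) h0] at h
      obtain rfl : n = n0 := (Option.some.inj h).symm
      have hitem : pvItem (mk :: rest) (s, n) = some ((0, s), n) := by
        simp only [pvItem, List.findIdx?_cons, if_pos h0]
        rfl
      rw [hitem]
      cases ht : pvBestOf (mk :: rest) (PySem.List.enumerate names (s + 1)) with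
      | none => exact ⟨s, le_refl s, rfl⟩
      | some y =>
        have hy := pvBestOf_bounds (mk :: rest) names (s + 1) y ht
        refine ⟨s, le_refl s, ?_⟩
        rcases y with ⟨⟨y1, y2⟩, yn⟩
        rw [pvCombine_some_some, if_neg]
        rw [pvLtKey_mk]
        simp only at hy
        omega
    · rw [List.find?_cons_of_neg (p := fun m => PySem.Str.isIn mk (PySem.Str.lower m)) h0] at h
      obtain ⟨k, hk, hb⟩ := ih (s + 1) h
      rw [hb]
      refine ⟨k, by omega, ?_⟩
      cases hi : pvItem (mk :: rest) (s, n0) with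
      | none => rw [pvCombine_none_left]
      | some z =>
        obtain ⟨i, hfi, rfl⟩ := pvItem_eq_some (mk :: rest) s n0 z hi
        have hipos : 0 < i := by
          rw [List.findIdx?_cons, if_neg h0] at hfi
          cases hf2 : rest.findIdx? (fun mk => PySem.Str.isIn mk (PySem.Str.lower n0)) with
          | none => rw [hf2] at hfi; simp at hfi
          | some j => rw [hf2] at hfi; simp only [Option.map_some, Option.some.injEq] at hfi; omega
        rw [pvCombine_some_some, if_pos]
        rw [pvLtKey_mk]
        left
        exact_mod_cast hipos

theorem pvPickB_eq_pickA (names markers : List String) : pickB names markers = pickA names markers := by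
  rw [pvPickB_eq_bestOf]
  induction markers with
  | nil => rw [pvBestOf_nil_markers]; rfl
  | cons mk rest ih =>
    simp only [pickA]
    cases hf : names.find? (fun m => PySem.Str.isIn mk (PySem.Str.lower m)) with
    | none =>
      have hall : ∀ n ∈ names, PySem.Str.isIn mk (PySem.Str.lower n) = false := by
        intro n hn
        have := List.find?_eq_none.mp hf n hn
        simpa using this
      rw [show PySem.List.enumerate names = PySem.List.enumerate names 0 from rfl,
          pvBestOf_shift mk rest names 0 hall]
      rw [show PySem.List.enumerate names 0 = PySem.List.enumerate names from rfl, ← ih]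
      cases pvBestOf rest (PySem.List.enumerate names) <;> rfl
    | some n =>
      obtain ⟨k, _, hb⟩ := pvBestOf_match mk rest names 0 n hf
      rw [show PySem.List.enumerate names = PySem.List.enumerate names 0 from rfl, hb]

-- ===== VERDICT (by name: the statement is the Claim_ definition above) =====
theorem recommended_ollama_model_py_spec : Claim_equal_recommended_ollama_model_py := by
  intro models mode _ pre
  unfold Spec_recommended_ollama_model_py recommended_ollama_model_py recommended_ollama_model_py_alt
  by_cases hm : models = []
  · simp [hm]
  · have hne : models.filter (fun m => !(m == "")) ≠ [] := by
      rcases pre with h | ⟨m, hmem, hmne⟩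
      · exact absurd h hm
      · intro hnil
        have : m ∈ models.filter (fun m => !(m == "")) := by
          simp [List.mem_filter, hmem, hmne]
        rw [hnil] at this
        simp at this
    simp only [hm, if_false, hne, pvPickB_eq_pickA]
    split_ifs <;> simp_all
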